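-- pv_equiv track=rewrite | github.com/SeaweedBrain1/pp1 | 04-Subroutines/exercise40.py | f
-- ===== SOURCE A (Python) =====
-- def f(number):
--     result = 0
--     string = str(number)
--     for i in range(1,10):
--         count = 0
--         x = 0
--         for char in string:
--             if str(i) == char:
--                 count += 1
--                 x += int(char)
--         if count < 2:
--             pass
--         else:
--             result += x
--     return result
-- ===== SOURCE B (Python) =====
-- def f(number):
--     total = 0
--     seen = {}
--     for ch in str(number):
--         if ch in "123456789":
--             c = seen.get(ch, 0) + 1
--             seen[ch] = c
--             if c == 2:
--                 total += 2 * int(ch)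
--             elif c > 2:
--                 total += int(ch)
--     return total
-- ===== Notes on version B (the rewrite author's own statement) =====
-- stated objective: alternative
-- what changed: B computes the answer in one streaming pass over str(number), adding twice a digit's value the moment that digit is seen for the second time and its value once on every later occurrence, instead of A's nine staged per-digit rescans that each count and then conditionally add.
import Mathlib
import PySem

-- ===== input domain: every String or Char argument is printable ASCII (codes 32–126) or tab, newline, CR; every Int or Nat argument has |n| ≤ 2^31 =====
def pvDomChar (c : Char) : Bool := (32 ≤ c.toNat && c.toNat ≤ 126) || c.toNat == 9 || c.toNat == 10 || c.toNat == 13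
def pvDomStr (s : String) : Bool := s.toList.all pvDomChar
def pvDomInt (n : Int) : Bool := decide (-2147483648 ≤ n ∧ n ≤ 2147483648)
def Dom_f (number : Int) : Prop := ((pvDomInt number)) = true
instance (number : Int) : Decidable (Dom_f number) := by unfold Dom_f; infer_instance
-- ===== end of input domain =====

-- B computes the result in one streaming pass over str(number), adding twice a digit's value
-- when it is seen the second time and its value on each later occurrence,
-- instead of A's nine per-digit rescans (objective: alternative decomposition).

-- ===== PORT A =====
-- literal port of A: for i in 1..9, scan the whole string counting and summing char i
-- (Python string equality/int() ported on the char-list side: str(i) == char is toChars i = [char])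
def f (number : Int) : Int :=
  let string := (PySem.Int.toStr number).toList
  (PySem.List.pyRange 1 10 1).foldl (fun result i =>
    let p := string.foldl (fun (p : Int × Int) char =>
      if PySem.Int.toChars i = [char] then
        -- int(char): in this branch char is the digit of i, so ofChars? never returns none
        (p.1 + 1, p.2 + (PySem.Int.ofChars? [char]).getD 0)
      else p) ((0 : Int), (0 : Int))
    if p.1 < 2 then result else result + p.2) 0

-- ===== PORT B =====
-- B's loop body as a helper; `ch in "123456789"` for a single char is exactly
-- membership in the char list, ported as List.contains
def bStep (st : Int × PySem.Dict Char Int) (ch : Char) : Int × PySem.Dict Char Int :=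
  if "123456789".toList.contains ch then
    let c := st.2.getD ch 0 + 1
    let seen := st.2.insert ch c
    if c = 2 then (st.1 + 2 * (PySem.Int.ofChars? [ch]).getD 0, seen)
    else if 2 < c then (st.1 + (PySem.Int.ofChars? [ch]).getD 0, seen)
    else (st.1, seen)
  else st

def f_alt (number : Int) : Int :=
  ((PySem.Int.toStr number).toList.foldl bStep ((0 : Int), PySem.Dict.empty)).1

-- ===== PRECONDITION & SPEC =====
def Spec_f (number : Int) (out : Int) : Prop := out = f_alt number
instance (number : Int) (out : Int) : Decidable (Spec_f number out) := by unfold Spec_f; infer_instance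

-- ===== CLAIM (what is proved, stated in full; the proofs are below) =====
def Claim_equal_f : Prop := ∀ (number : Int), Dom_f number → Spec_f number (f number)

-- ===== LEMMAS AND PROOFS =====

-- the nine digit characters, the int value of one, the contribution of one digit
def pvDigits : List Char := ['1','2','3','4','5','6','7','8','9']
def pvVal (c : Char) : Int := (PySem.Int.ofChars? [c]).getD 0
def pvG (c : Char) (n : Nat) : Int := if 2 ≤ n then pvVal c * n else 0
def pvT (s : List Char) : Int := (pvDigits.map (fun d => pvG d (s.count d))).sum

-- A's inner scan for the digit character c: count is s.count c and x is s.count c times the value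
theorem innerA (c : Char) (s : List Char) (a b : Int) :
    s.foldl (fun (p : Int × Int) char =>
      if ([c] : List Char) = [char] then
        (p.1 + 1, p.2 + (PySem.Int.ofChars? [char]).getD 0)
      else p) (a, b)
    = (a + s.count c, b + (s.count c : Int) * pvVal c) := by
  induction s generalizing a b with
  | nil => simp
  | cons x xs ih =>
    by_cases h : x = c
    · subst h
      simp only [List.foldl, Prod.mk.injEq, List.count_cons_self, ih, pvVal]
      constructor <;> push_cast <;> ring
    · have hne : ¬ (([c] : List Char) = [x]) := by
        simp only [List.cons.injEq, and_true]
        exact fun e => h e.symm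
      rw [List.foldl, if_neg hne, ih]
      simp [h]

-- one step of A's outer loop as a contribution
theorem stepA (n : Nat) (v r : Int) :
    (if (n : Int) < 2 then r else r + (n : Int) * v) = r + (if 2 ≤ n then v * n else 0) := by
  split_ifs with h1 h2 h2 <;> first | omega | (push_cast; ring)

-- the first step of A's outer loop (the accumulator is the literal 0 after zero_add)
theorem stepA0 (n : Nat) (v : Int) :
    (if (n : Int) < 2 then (0 : Int) else (n : Int) * v) = (if 2 ≤ n then v * n else 0) := by
  split_ifs with h1 h2 h2 <;> first | omega | (push_cast; ring)

-- A equals the sum of per-digit contributions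
theorem fA_eq (number : Int) :
    f number = pvT ((PySem.Int.toStr number).toList) := by
  unfold f pvT
  rw [show PySem.List.pyRange 1 10 1 = [1,2,3,4,5,6,7,8,9] from by decide]
  simp only [List.foldl]
  rw [show PySem.Int.toChars 1 = ['1'] from rfl, show PySem.Int.toChars 2 = ['2'] from rfl,
      show PySem.Int.toChars 3 = ['3'] from rfl, show PySem.Int.toChars 4 = ['4'] from rfl,
      show PySem.Int.toChars 5 = ['5'] from rfl, show PySem.Int.toChars 6 = ['6'] from rfl,
      show PySem.Int.toChars 7 = ['7'] from rfl, show PySem.Int.toChars 8 = ['8'] from rfl,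
      show PySem.Int.toChars 9 = ['9'] from rfl]
  simp only [innerA, zero_add, stepA0, stepA]
  simp only [pvDigits, pvG, pvVal, List.map, List.sum_cons, List.sum_nil]
  ring

-- a sum over distinct keys changes only at the key whose count changed
theorem sum_map_update (l : List Char) (hl : l.Nodup) (x : Char) (hx : x ∈ l)
    (F G : Char → Int) (hne : ∀ d ∈ l, d ≠ x → G d = F d) :
    (l.map G).sum = (l.map F).sum + (G x - F x) := by
  induction l with
  | nil => cases hx
  | cons a l ih =>
    rcases List.nodup_cons.mp hl with ⟨ha, hl'⟩
    rcases List.mem_cons.mp hx with rfl | hx'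
    · have : l.map G = l.map F := by
        apply List.map_congr_left
        intro d hd
        exact hne d (List.mem_cons_of_mem _ hd) (fun e => ha (e ▸ hd))
      simp only [List.map, List.sum_cons, this]
      ring
    · have hax : a ≠ x := fun e => ha (e ▸ hx')
      have := ih hl' hx' (fun d hd hdx => hne d (List.mem_cons_of_mem _ hd) hdx)
      simp only [List.map, List.sum_cons, this, hne a (List.mem_cons_self) hax]
      ring

theorem count_snoc_ne {s : List Char} {d x : Char} (h : d ≠ x) :
    (s ++ [x]).count d = s.count d := by
  simp [List.count_append, Ne.symm h]

theorem pvT_snoc_digit (s : List Char) (x : Char) (hx : x ∈ pvDigits) :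
    pvT (s ++ [x]) = pvT s + (pvG x (s.count x + 1) - pvG x (s.count x)) := by
  unfold pvT
  have := sum_map_update pvDigits (by decide) x hx
      (fun d => pvG d (s.count d)) (fun d => pvG d ((s ++ [x]).count d))
      (fun d _ hdx => by simp only [count_snoc_ne hdx])
  rw [this]
  simp [List.count_append]

theorem pvT_snoc_nondigit (s : List Char) (x : Char) (hx : x ∉ pvDigits) :
    pvT (s ++ [x]) = pvT s := by
  unfold pvT
  congr 1
  apply List.map_congr_left
  intro d hd
  have hdx : d ≠ x := by rintro rfl; exact hx hd
  simp only [count_snoc_ne hdx]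

-- B's incremental contribution equals the change of the per-digit contribution
theorem deltaB (v t : Int) (n : Nat) :
    (if (n : Int) + 1 = 2 then t + 2 * v else if 2 < (n : Int) + 1 then t + v else t)
      = t + ((if 2 ≤ n + 1 then v * (n + 1 : Nat) else 0) - (if 2 ≤ n then v * n else 0)) := by
  rcases n with _ | _ | k
  · norm_num
  · norm_num
    ring
  · rw [if_neg (by push_cast; omega), if_pos (by push_cast; omega),
       if_pos (by omega), if_pos (by omega)]
    push_cast
    ring

-- invariant of B's single pass: the total so far is pvT of the prefix,
-- and the dict holds the count of every digit character
theorem bInv (s : List Char) :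
    (s.foldl bStep ((0 : Int), PySem.Dict.empty)).1 = pvT s ∧
    ∀ c ∈ pvDigits,
      (s.foldl bStep ((0 : Int), PySem.Dict.empty)).2.getD c 0 = (s.count c : Int) := by
  induction s using List.reverseRecOn with
  | nil =>
    constructor
    · simp [pvT, pvDigits, pvG]
    · intro c _
      simp [PySem.Dict.getD_empty]
  | append_singleton s x ih =>
    obtain ⟨ih1, ih2⟩ := ih
    rw [List.foldl_append, List.foldl_cons, List.foldl_nil]
    have h9 : "123456789".toList = pvDigits := by decide
    by_cases hx : x ∈ pvDigits
    · have hcont : ("123456789".toList.contains x) = true := by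
        rw [h9]; exact List.elem_eq_true_of_mem hx
      simp only [bStep, hcont, if_true, ih2 x hx]
      constructor
      · -- running total
        rw [apply_ite Prod.fst, apply_ite Prod.fst]
        simp only []
        rw [deltaB, ih1, pvT_snoc_digit s x hx]
        unfold pvG pvVal
        push_cast
        ring
      · -- digit counts in the dict
        intro c hc
        rw [apply_ite Prod.snd, apply_ite Prod.snd]
        simp only [ite_self]
        rw [PySem.Dict.getD_insert]
        by_cases hcx : c = x
        · subst hcx
          rw [if_pos rfl]
          simp [List.count_append]
        · rw [if_neg hcx, count_snoc_ne hcx]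
          exact ih2 c hc
    · have hcont : ("123456789".toList.contains x) = false := by
        rw [h9]
        simpa using hx
      simp only [bStep, hcont, Bool.false_eq_true, if_false]
      constructor
      · rw [pvT_snoc_nondigit s x hx]
        exact ih1
      · intro c hc
        have hcx : c ≠ x := by rintro rfl; exact hx hc
        rw [count_snoc_ne hcx]
        exact ih2 c hc

-- ===== VERDICT (by name: the statement is the Claim_ definition above) =====
theorem f_spec : Claim_equal_f := by
  intro number _
  unfold Spec_f
  rw [fA_eq]
  unfold f_alt
  exact ((bInv _).1).symm
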